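-- pv_equiv track=rewrite | github.com/njlane314/rarexsec-analysis | config/scripts/build_sample_catalog.py | runset_token
-- ===== SOURCE A (Python) =====
-- def norm_run(run: str) -> str:
--     digits = "".join(ch for ch in run if ch.isdigit())
--     return f"r{digits}" if digits else run
--
-- def runset_token(runs: list[str]) -> str:
--     if not runs:
--         return "all"
--     if len(runs) == 1:
--         return norm_run(runs[0])
--     try:
--         nums = sorted(int("".join(ch for ch in r if ch.isdigit())) for r in runs)
--         if nums == list(range(nums[0], nums[-1] + 1)):
--             return f"r{nums[0]}-r{nums[-1]}"
--     except Exception: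
--         pass
--     return ",".join(norm_run(r) for r in runs)
-- ===== SOURCE B (Python) =====
-- def norm_run(run: str) -> str:
--     digits = "".join(ch for ch in run if ch.isdigit())
--     return f"r{digits}" if digits else run
--
-- def runset_token(runs: list[str]) -> str:
--     if not runs:
--         return "all"
--     if len(runs) == 1:
--         return norm_run(runs[0])
--     try:
--         nums = [int("".join(ch for ch in r if ch.isdigit())) for r in runs]
--         s = set(nums)
--         mn, mx = min(s), max(s)
--         if len(s) == len(nums) and mx - mn + 1 == len(nums):
--             return f"r{mn}-r{mx}"
--     except ValueError:
--         pass
--     return ",".join(norm_run(r) for r in runs)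
-- ===== Notes on version B (the rewrite author's own statement) =====
-- stated objective: alternative
-- what changed: The contiguous-range test is computed arithmetically from a set (len(set)==len(nums) and max-min+1==len(nums)) instead of sorting the numbers and comparing them against a materialized list(range(...))
import Mathlib
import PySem

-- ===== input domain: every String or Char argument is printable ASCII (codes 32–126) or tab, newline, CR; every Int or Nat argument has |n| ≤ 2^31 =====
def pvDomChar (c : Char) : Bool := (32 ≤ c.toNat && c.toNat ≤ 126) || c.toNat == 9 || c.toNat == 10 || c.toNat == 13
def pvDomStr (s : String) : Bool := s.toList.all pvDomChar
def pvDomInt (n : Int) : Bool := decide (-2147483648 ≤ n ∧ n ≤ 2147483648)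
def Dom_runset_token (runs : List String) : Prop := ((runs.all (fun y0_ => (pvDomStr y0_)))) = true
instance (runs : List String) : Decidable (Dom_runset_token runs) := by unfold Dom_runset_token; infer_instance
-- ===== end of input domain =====

-- B computes the contiguous-range test arithmetically from the set of extracted numbers
-- (len(set)==len(nums) and max-min+1==len(nums)) instead of sorting and comparing with list(range(...)).

-- ===== PORT A =====
-- shared helper: norm_run and the join/f-string constructions are textually identical in both Pythons
def pvDigits (r : String) : List Char := r.toList.filter (fun c => PySem.Chars.isdigit c)

def pvNormRun (run : String) : String :=
  let digits := pvDigits run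
  if digits.isEmpty then run else String.ofList ('r' :: digits)

def pvRunNum? (r : String) : Option Int := PySem.Int.ofChars? (pvDigits r)

def pvJoin (runs : List String) : String := PySem.Str.join "," (runs.map pvNormRun)

def pvRangeTok (mn mx : Int) : String :=
  String.ofList ('r' :: (PySem.Int.toChars mn ++ '-' :: 'r' :: PySem.Int.toChars mx))

def runset_token (runs : List String) : String :=
  if runs = [] then "all"
  else if runs.length = 1 then pvNormRun (PySem.List.pyGetD runs 0 "")
  else
    match runs.mapM pvRunNum? with
    | none => pvJoin runs
    | some ns =>
      let nums := PySem.List.sorted ns (fun x => x) false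
      let a := PySem.List.pyGetD nums 0 0
      let b := PySem.List.pyGetD nums (-1) 0
      if nums = PySem.List.pyRange a (b + 1) 1 then pvRangeTok a b
      else pvJoin runs

-- ===== PORT B =====
def runset_token_alt (runs : List String) : String :=
  if runs = [] then "all"
  else if runs.length = 1 then pvNormRun (PySem.List.pyGetD runs 0 "")
  else
    match runs.mapM pvRunNum? with
    | none => pvJoin runs
    | some nums =>
      let s := PySem.Set.ofList nums
      let mn := (PySem.List.min? s (fun x => x)).getD 0
      let mx := (PySem.List.max? s (fun x => x)).getD 0
      if PySem.Set.len s = (nums.length : Int) ∧ mx - mn + 1 = (nums.length : Int) then pvRangeTok mn mx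
      else pvJoin runs

-- ===== PRECONDITION & SPEC =====
def Spec_runset_token (runs : List String) (out : String) : Prop := out = runset_token_alt runs
instance (runs : List String) (out : String) : Decidable (Spec_runset_token runs out) := by unfold Spec_runset_token; infer_instance

-- ===== CLAIM (what is proved, stated in full; the proofs are below) =====
def Claim_equal_runset_token : Prop := ∀ (runs : List String), Dom_runset_token runs → Spec_runset_token runs (runset_token runs)

-- ===== LEMMAS AND PROOFS =====

-- Set.ofList xs is a sublist of xs
theorem pv_foldl_add_sublist {α : Type} [BEq α] (xs : List α) :
    ∀ (s : List α), ∃ t, xs.foldl PySem.Set.add s = s ++ t ∧ t.Sublist xs := by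
  induction xs with
  | nil => intro s; exact ⟨[], by simp⟩
  | cons x xs ih =>
    intro s
    by_cases hc : s.contains x = true
    · obtain ⟨t, ht, hs⟩ := ih (PySem.Set.add s x)
      refine ⟨t, ?_, hs.trans (List.sublist_cons_self x xs)⟩
      rw [List.foldl_cons, ht]
      simp [PySem.Set.add, hc]
    · obtain ⟨t, ht, hs⟩ := ih (PySem.Set.add s x)
      refine ⟨x :: t, ?_, List.Sublist.cons₂ x hs⟩
      rw [List.foldl_cons, ht]
      simp [PySem.Set.add, hc]

theorem pv_ofList_sublist {α : Type} [BEq α] (xs : List α) :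
    (PySem.Set.ofList xs).Sublist xs := by
  obtain ⟨t, ht, hs⟩ := pv_foldl_add_sublist xs []
  rw [PySem.Set.ofList_eq_foldl, ht]
  simpa using hs

theorem pv_nodup_of_len_ofList {α : Type} [BEq α] [LawfulBEq α] (xs : List α)
    (h : (PySem.Set.ofList xs).length = xs.length) : xs.Nodup := by
  have := (pv_ofList_sublist xs).eq_of_length h
  rw [← this]; exact PySem.Set.nodup_ofList xs

-- sorted head is the minimum, sorted last is the maximum
theorem pv_mapM_length {α β : Type} (f : α → Option β) :
    ∀ (xs : List α) (ys : List β), xs.mapM f = some ys → ys.length = xs.length := by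
  intro xs
  induction xs with
  | nil =>
    intro ys hmm
    simp only [List.mapM_nil, Option.pure_def, Option.some_inj] at hmm
    simp [← hmm]
  | cons x xs ih =>
    intro ys hmm
    rw [List.mapM_cons] at hmm
    cases hfx : f x with
    | none => rw [hfx] at hmm; simp at hmm
    | some b =>
      rw [hfx] at hmm
      cases hmt : xs.mapM f with
      | none => rw [hmt] at hmm; simp at hmm
      | some t =>
        rw [hmt] at hmm
        simp at hmm
        subst hmm
        simp [ih t hmt]

theorem pv_sorted_head (nums : List Int) (m : Int) (h : nums ≠ [])
    (hm : m ∈ nums) (hmle : ∀ y ∈ nums, m ≤ y) :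
    PySem.List.pyGetD (PySem.List.sorted nums (fun x => x) false) 0 0 = m := by
  have hys : PySem.List.sorted nums (fun x => x) false ≠ [] := by
    rw [Ne, PySem.List.sorted_eq_nil_iff]; exact h
  obtain ⟨y, t, hyt⟩ := List.exists_cons_of_ne_nil hys
  rw [hyt, PySem.List.pyGetD_zero_cons]
  have hy_mem : y ∈ nums := by
    rw [← PySem.List.mem_sorted nums (fun x => x) false y, hyt]
    exact List.mem_cons_self
  exact le_antisymm (PySem.List.key_head_sorted_le nums (fun x => x) hyt m hm) (hmle y hy_mem)

theorem pv_sorted_last (nums : List Int) (M : Int) (h : nums ≠ [])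
    (hM : M ∈ nums) (hMge : ∀ y ∈ nums, y ≤ M) :
    PySem.List.pyGetD (PySem.List.sorted nums (fun x => x) false) (-1) 0 = M := by
  have hys : PySem.List.sorted nums (fun x => x) false ≠ [] := by
    rw [Ne, PySem.List.sorted_eq_nil_iff]; exact h
  have hpos : 0 < (PySem.List.sorted nums (fun x => x) false).length :=
    List.length_pos_iff.mpr hys
  rw [PySem.List.pyGetD_neg_one _ _ hys, List.getLast_eq_getElem]
  have hmem : (PySem.List.sorted nums (fun x => x) false)[(PySem.List.sorted nums (fun x => x) false).length - 1] ∈ nums := by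
    rw [← PySem.List.mem_sorted nums (fun x => x) false]
    exact List.getElem_mem _
  have hMs : M ∈ PySem.List.sorted nums (fun x => x) false :=
    (PySem.List.mem_sorted nums (fun x => x) false M).mpr hM
  obtain ⟨p, hp, hpe⟩ := List.getElem_of_mem hMs
  have hmono := PySem.List.sorted_id_getElem_mono nums
    (p := p) (q := (PySem.List.sorted nums (fun x => x) false).length - 1)
    (by omega) (by omega)
  rw [hpe] at hmono
  exact le_antisymm (hMge _ hmem) hmono

theorem pv_cond_iff (nums : List Int) (m M : Int) (h : nums ≠ [])
    (hm : m ∈ nums) (hmle : ∀ y ∈ nums, m ≤ y)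
    (hM : M ∈ nums) (hMge : ∀ y ∈ nums, y ≤ M) :
    (PySem.List.sorted nums (fun x => x) false = PySem.List.pyRange m (M + 1) 1 ↔
      (PySem.Set.len (PySem.Set.ofList nums) = (nums.length : Int) ∧
        M - m + 1 = (nums.length : Int))) := by
  have hlen0 : 0 < nums.length := List.length_pos_iff.mpr h
  have hmM : m ≤ M := hmle M hM
  have hrlen : (PySem.List.pyRange m (M + 1) 1).length = (M + 1 - m).toNat :=
    PySem.List.length_pyRange_one m (M + 1)
  constructor
  · intro heq
    have hperm : (PySem.List.pyRange m (M + 1) 1).Perm nums :=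
      heq ▸ PySem.List.sorted_perm nums (fun x => x) false
    have hnd : nums.Nodup := hperm.nodup_iff.mp (PySem.List.nodup_pyRange_one m (M + 1))
    refine ⟨?_, ?_⟩
    · rw [PySem.Set.ofList_eq_self_of_nodup nums hnd]
      simp [PySem.Set.len]
    · have hl := hperm.length_eq
      rw [hrlen] at hl
      omega
  · rintro ⟨hslen, hcard⟩
    have hnd : nums.Nodup := pv_nodup_of_len_ofList nums (by
      have : ((PySem.Set.ofList nums).length : Int) = (nums.length : Int) := by
        simpa [PySem.Set.len] using hslen
      exact_mod_cast this)
    have hsub : nums ⊆ PySem.List.pyRange m (M + 1) 1 := by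
      intro x hx
      exact PySem.List.mem_pyRange_one.mpr ⟨hmle x hx, by have := hMge x hx; omega⟩
    have hperm : nums.Perm (PySem.List.pyRange m (M + 1) 1) :=
      (hnd.subperm hsub).perm_of_length_le (by rw [hrlen]; omega)
    exact PySem.List.sorted_eq_of_perm_of_pairwise_lt nums (PySem.List.pyRange m (M + 1) 1)
      (fun x => x) hperm.symm (PySem.List.pairwise_lt_pyRange_one m (M + 1))

-- ===== VERDICT (by name: the statement is the Claim_ definition above) =====
theorem runset_token_spec : Claim_equal_runset_token := by
  intro runs _
  unfold Spec_runset_token runset_token runset_token_alt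
  by_cases h0 : runs = []
  · simp [h0]
  · rw [if_neg h0, if_neg h0]
    by_cases h1 : runs.length = 1
    · rw [if_pos h1, if_pos h1]
    · rw [if_neg h1, if_neg h1]
      cases hmap : runs.mapM pvRunNum? with
      | none => rfl
      | some nums =>
        have hlen : nums.length = runs.length := pv_mapM_length pvRunNum? runs nums hmap
        have hne : nums ≠ [] := by
          intro hc
          apply h0
          rw [← List.length_eq_zero_iff, ← hlen, hc]
          rfl
        have hsne : PySem.Set.ofList nums ≠ [] := by
          obtain ⟨x, hx⟩ := List.exists_mem_of_ne_nil nums hne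
          intro hc
          have hx2 := (PySem.Set.mem_ofList nums x).mpr hx
          rw [hc] at hx2
          exact absurd hx2 (List.not_mem_nil)
        obtain ⟨m, hmin⟩ : ∃ m, PySem.List.min? (PySem.Set.ofList nums) (fun x => x) = some m := by
          cases hq : PySem.List.min? (PySem.Set.ofList nums) (fun x => x) with
          | none => exact absurd ((PySem.List.min?_eq_none_iff _ _).mp hq) hsne
          | some m => exact ⟨m, rfl⟩
        obtain ⟨M, hmax⟩ : ∃ M, PySem.List.max? (PySem.Set.ofList nums) (fun x => x) = some M := by
          cases hq : PySem.List.max? (PySem.Set.ofList nums) (fun x => x) with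
          | none => exact absurd ((PySem.List.max?_eq_none_iff _ _).mp hq) hsne
          | some M => exact ⟨M, rfl⟩
        have hm : m ∈ nums := (PySem.Set.mem_ofList nums m).mp (PySem.List.min?_mem hmin)
        have hmle : ∀ y ∈ nums, m ≤ y := fun y hy =>
          PySem.List.min?_isMin hmin y ((PySem.Set.mem_ofList nums y).mpr hy)
        have hM : M ∈ nums := (PySem.Set.mem_ofList nums M).mp (PySem.List.max?_mem hmax)
        have hMge : ∀ y ∈ nums, y ≤ M := fun y hy =>
          PySem.List.max?_isMax hmax y ((PySem.Set.mem_ofList nums y).mpr hy)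
        simp only [hmin, hmax, Option.getD_some,
          pv_sorted_head nums m hne hm hmle, pv_sorted_last nums M hne hM hMge]
        exact if_congr (pv_cond_iff nums m M hne hm hmle hM hMge) rfl rfl
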